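-- pv_equiv track=rewrite | github.com/mstfatay/instagram_cekilis_bot | cekilis.py | findNeededPages
-- ===== SOURCE A (Python) =====
-- def findNeededPages(text):
--     text = text + ' '
--     started = False
--     pages = []
--     word = ''
--     text = text.replace('\n', ' ')
--     for a in text:
--         if a == '@':
--             started = True
--         if started :
--             if a != ' ' and  a != ')' and  a != '}' and  a != ']':
--                 word = word + a
--             else:
--                 pages.append(word)
--                 word = ''
--                 started = False
--     return pages
-- ===== SOURCE B (Python) =====
-- def isTerm(c):
--     return c == ' ' or c == '\n' or c == ')' or c == '}' or c == ']'
--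
--
-- def findNeededPages(text):
--     pages = []
--     n = len(text)
--     i = 0
--     while i < n:
--         if text[i] == '@':
--             j = i
--             while j < n and not isTerm(text[j]):
--                 j += 1
--             pages.append(text[i:j])
--             i = j
--         else:
--             i += 1
--     return pages
-- ===== Notes on version B (the rewrite author's own statement) =====
-- stated objective: simpler
-- what changed: A's per-character state machine (started flag + growing word accumulator over a '\n'-replaced copy with a sentinel space appended) is replaced by two-pointer index scanning: jump to the next '@', advance a second index to the next terminator, and slice the mention out of the original string.
import Mathlib
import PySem

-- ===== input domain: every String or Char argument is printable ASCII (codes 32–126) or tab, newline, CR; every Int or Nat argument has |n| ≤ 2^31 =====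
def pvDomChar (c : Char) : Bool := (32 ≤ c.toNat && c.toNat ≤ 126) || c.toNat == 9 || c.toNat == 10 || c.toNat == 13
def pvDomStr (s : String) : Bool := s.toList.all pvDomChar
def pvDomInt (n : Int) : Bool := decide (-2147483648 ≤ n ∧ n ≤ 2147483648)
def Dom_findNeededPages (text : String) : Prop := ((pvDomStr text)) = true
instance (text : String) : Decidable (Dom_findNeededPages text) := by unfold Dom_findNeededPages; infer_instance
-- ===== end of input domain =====

-- B replaces A's per-character started/word state machine by two-pointer index scanning
-- (jump to the next '@', scan to the next terminator, slice) — objective: simpler; same results.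

-- ===== PORT A =====
-- body of A's for-loop; state = (started, pages, word)
def aStep (st : Bool × List String × String) (a : Char) : Bool × List String × String :=
  let started := if a = '@' then true else st.1
  if started then
    if a ≠ ' ' ∧ a ≠ ')' ∧ a ≠ '}' ∧ a ≠ ']' then
      (started, st.2.1, st.2.2.push a)
    else
      (false, st.2.1 ++ [st.2.2], "")
  else (started, st.2.1, st.2.2)

def findNeededPages (text : String) : List String :=
  let text1 := text ++ " "
  let text2 := PySem.Str.replace text1 "\n" " "
  (text2.toList.foldl aStep (false, [], "")).2.1

-- ===== PORT B =====
def isTermB (c : Char) : Bool := c == ' ' || c == '\n' || c == ')' || c == '}' || c == ']'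

-- Source B's inner while loop: advance j past non-terminator characters
def bEnd (cs : List Char) (j : Nat) : Nat :=
  if h : j < cs.length then
    if isTermB cs[j] then j else bEnd cs (j + 1)
  else j
termination_by cs.length - j

-- cited by bScan's decreasing_by
theorem bEnd_ge (cs : List Char) : ∀ (k j : Nat), cs.length - j ≤ k → j ≤ bEnd cs j := by
  intro k
  induction k with
  | zero =>
    intro j h
    rw [bEnd, dif_neg (by omega)]
  | succ k ih =>
    intro j h
    rw [bEnd]
    split
    · split
      · exact le_rfl
      · exact le_trans (Nat.le_succ j) (ih (j + 1) (by omega))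
    · exact le_rfl

-- cited by bScan's decreasing_by
theorem bEnd_step (cs : List Char) (j : Nat) (h : j < cs.length)
    (ht : isTermB cs[j] = false) : bEnd cs j = bEnd cs (j + 1) := by
  rw [bEnd, dif_pos h, if_neg (by simp [ht])]

-- Source B's outer while loop over index i
def bScan (cs : List Char) (i : Nat) : List String :=
  if h : i < cs.length then
    if hc : cs[i] = '@' then
      let j := bEnd cs i
      String.ofList (PySem.List.slice cs (some (i : Int)) (some (j : Int))) :: bScan cs j
    else bScan cs (i + 1)
  else []
termination_by cs.length - i
decreasing_by
  · have h1 : bEnd cs i = bEnd cs (i + 1) :=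
      bEnd_step cs i h (by rw [hc]; decide)
    have h2 : i + 1 ≤ bEnd cs (i + 1) := bEnd_ge cs (cs.length) (i + 1) (by omega)
    omega
  · omega

def findNeededPages_alt (text : String) : List String := bScan text.toList 0

-- ===== PRECONDITION & SPEC =====
def Spec_findNeededPages (text : String) (out : List String) : Prop := out = findNeededPages_alt text
instance (text : String) (out : List String) : Decidable (Spec_findNeededPages text out) := by unfold Spec_findNeededPages; infer_instance

-- ===== CLAIM (what is proved, stated in full; the proofs are below) =====
def Claim_equal_findNeededPages : Prop := ∀ (text : String), Dom_findNeededPages text → Spec_findNeededPages text (findNeededPages text)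

-- ===== LEMMAS AND PROOFS =====

-- '\n' → ' ' (what A's text.replace does to each character)
def nlC (c : Char) : Char := if c = '\n' then ' ' else c

-- A's loop step after the '\n' replacement has been pushed inside
def step5 (st : Bool × List String × String) (c : Char) : Bool × List String × String :=
  aStep st (nlC c)

theorem replace_go_single (c d : Char) :
    ∀ (l : List Char) (fuel : Nat) (acc : List Char), l.length ≤ fuel →
      PySem.Chars.replace.go [c] [d] fuel l acc
        = acc.reverse ++ l.map (fun x => if x = c then d else x) := by
  intro l
  induction l with
  | nil => intro fuel acc h; cases fuel <;> simp [PySem.Chars.replace.go]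
  | cons c0 t ih =>
    intro fuel acc h
    cases fuel with
    | zero => simp at h
    | succ f =>
      rw [PySem.Chars.replace.go]
      by_cases hc : c0 = c
      · rw [if_pos (by simp [hc, List.isPrefixOf])]
        simp only [List.length_cons, List.length_nil, List.drop_succ_cons, List.drop_zero,
          List.reverse_cons, List.reverse_nil, List.nil_append, List.singleton_append]
        rw [ih f (d :: acc) (by simpa using h)]
        simp [hc]
      · rw [if_neg (by simp [List.isPrefixOf]; exact fun e => hc e.symm)]
        rw [ih f (c0 :: acc) (by simpa using h)]
        simp [hc]

theorem replace_single (s : List Char) (c d : Char) :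
    PySem.Chars.replace s [c] [d] = s.map (fun x => if x = c then d else x) := by
  unfold PySem.Chars.replace
  rw [if_neg (by simp)]
  simpa using replace_go_single c d s s.length [] le_rfl

theorem str_ext {a b : String} (h : a.toList = b.toList) : a = b := String.toList_inj.mp h

theorem step5_false (P : List String) (w : String) (c : Char) :
    step5 (false, P, w) c = if c = '@' then (true, P, w.push '@') else (false, P, w) := by
  by_cases hc : c = '@'
  · subst hc; simp [step5, nlC, aStep]
  · by_cases hn : c = '\n'
    · subst hn; simp [step5, nlC, aStep]
    · simp [step5, nlC, aStep, hn, hc]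

theorem step5_true (P : List String) (w : String) (c : Char) :
    step5 (true, P, w) c = if isTermB c then (false, P ++ [w], "") else (true, P, w.push c) := by
  by_cases hn : c = '\n'
  · subst hn; simp [step5, nlC, aStep, isTermB]
  · by_cases ht : isTermB c
    · rcases (by simpa [isTermB, hn] using ht : ((c = ' ' ∨ c = ')') ∨ c = '}') ∨ c = ']') with ((h | h) | h) | h <;>
        subst h <;> simp [step5, nlC, aStep, isTermB]
    · have h1 : c ≠ ' ' ∧ c ≠ ')' ∧ c ≠ '}' ∧ c ≠ ']' := by
        simp [isTermB] at ht; tauto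
      simp [step5, nlC, aStep, hn, ht, h1.1, h1.2.1, h1.2.2.1, h1.2.2.2]

theorem bEnd_stop_ge (cs : List Char) (j : Nat) (h : cs.length ≤ j) : bEnd cs j = j := by
  rw [bEnd, dif_neg (by omega)]

theorem bEnd_stop_term (cs : List Char) (j : Nat) (h : j < cs.length)
    (ht : isTermB cs[j] = true) : bEnd cs j = j := by
  rw [bEnd, dif_pos h, if_pos ht]

theorem bScan_stop (cs : List Char) (i : Nat) (h : cs.length ≤ i) : bScan cs i = [] := by
  rw [bScan, dif_neg (by omega)]

theorem bScan_skip (cs : List Char) (i : Nat) (h : i < cs.length) (hc : cs[i] ≠ '@') :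
    bScan cs i = bScan cs (i + 1) := by
  rw [bScan, dif_pos h, dif_neg hc]

theorem bScan_at (cs : List Char) (i : Nat) (h : i < cs.length) (hc : cs[i] = '@') :
    bScan cs i
      = String.ofList (PySem.List.slice cs (some (i : Int)) (some ((bEnd cs i : Nat) : Int)))
          :: bScan cs (bEnd cs i) := by
  rw [bScan, dif_pos h, dif_pos hc]

theorem main_loop (cs : List Char) : ∀ (k i : Nat), cs.length - i ≤ k → i ≤ cs.length →
    (∀ (P : List String),
      (List.foldl step5 (false, P, "") (cs.drop i ++ [' '])).2.1 = P ++ bScan cs i)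
  ∧ (∀ (P : List String) (w : String),
      (List.foldl step5 (true, P, w) (cs.drop i ++ [' '])).2.1
        = P ++ (w ++ String.ofList ((cs.drop i).take (bEnd cs i - i))) :: bScan cs (bEnd cs i)) := by
  intro k
  induction k with
  | zero =>
    intro i hk hi
    have hin : i = cs.length := by omega
    subst hin
    constructor
    · intro P
      simp [List.drop_length, step5_false, bScan_stop cs cs.length le_rfl]
    · intro P w
      simp [List.drop_length, step5_true, isTermB, bEnd_stop_ge cs cs.length le_rfl,
        bScan_stop cs cs.length le_rfl]
  | succ k ih =>
    intro i hk hi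
    by_cases hlt : i < cs.length
    case neg =>
      have hin : i = cs.length := by omega
      subst hin
      constructor
      · intro P
        simp [List.drop_length, step5_false, bScan_stop cs cs.length le_rfl]
      · intro P w
        simp [List.drop_length, step5_true, isTermB, bEnd_stop_ge cs cs.length le_rfl,
          bScan_stop cs cs.length le_rfl]
    case pos =>
      have hdrop : cs.drop i = cs[i] :: cs.drop (i + 1) := List.drop_eq_getElem_cons hlt
      have ih' := ih (i + 1) (by omega) (by omega)
      constructor
      · intro P
        rw [hdrop]
        simp only [List.cons_append, List.foldl_cons, step5_false]
        by_cases hc : cs[i] = '@'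
        · rw [if_pos hc]
          have hterm : isTermB cs[i] = false := by rw [hc]; decide
          have hEq : bEnd cs i = bEnd cs (i + 1) := bEnd_step cs i hlt hterm
          have hge : i + 1 ≤ bEnd cs (i + 1) := bEnd_ge cs cs.length (i + 1) (by omega)
          have hws : ("".push '@') ++ String.ofList ((cs.drop (i + 1)).take (bEnd cs (i + 1) - (i + 1)))
              = String.ofList (PySem.List.slice cs (some (i : Int)) (some ((bEnd cs (i + 1) : Nat) : Int))) := by
            apply str_ext
            rw [PySem.List.slice_natCast, hdrop]
            have hsm : bEnd cs (i + 1) - i = (bEnd cs (i + 1) - (i + 1)) + 1 := by omega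
            rw [hsm, List.take_succ_cons]
            simp [hc]
          rw [ih'.2 P ("".push '@')]
          rw [bScan_at cs i hlt hc, hEq, hws]
        · rw [if_neg hc]
          rw [ih'.1 P, bScan_skip cs i hlt hc]
      · intro P w
        rw [hdrop]
        simp only [List.cons_append, List.foldl_cons, step5_true]
        by_cases ht : isTermB cs[i]
        · rw [if_pos ht]
          have hc : cs[i] ≠ '@' := by intro e; rw [e] at ht; exact absurd ht (by decide)
          have hEq : bEnd cs i = i := bEnd_stop_term cs i hlt ht
          rw [ih'.1 (P ++ [w])]
          rw [hEq, bScan_skip cs i hlt hc]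
          simp
        · rw [if_neg ht]
          have hEq : bEnd cs i = bEnd cs (i + 1) := bEnd_step cs i hlt (by simpa using ht)
          have hge : i + 1 ≤ bEnd cs (i + 1) := bEnd_ge cs cs.length (i + 1) (by omega)
          have hws : (w.push cs[i]) ++ String.ofList ((cs.drop (i + 1)).take (bEnd cs (i + 1) - (i + 1)))
              = w ++ String.ofList ((cs[i] :: cs.drop (i + 1)).take (bEnd cs (i + 1) - i)) := by
            apply str_ext
            have hsm : bEnd cs (i + 1) - i = (bEnd cs (i + 1) - (i + 1)) + 1 := by omega
            rw [hsm, List.take_succ_cons]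
            simp
          rw [ih'.2 P (w.push cs[i]), hEq, hws]

theorem toList_cleaned (text : String) :
    (PySem.Str.replace (text ++ " ") "\n" " ").toList = (text.toList ++ [' ']).map nlC := by
  have h := replace_single ((text ++ " ").toList) '\n' ' '
  simp only [PySem.Str.toList_replace]
  simpa [nlC, String.toList_append] using h

-- ===== VERDICT (by name: the statement is the Claim_ definition above) =====
theorem findNeededPages_spec : Claim_equal_findNeededPages := by
  intro text _
  unfold Spec_findNeededPages findNeededPages findNeededPages_alt
  simp only
  rw [toList_cleaned, List.foldl_map]
  have h := (main_loop text.toList text.toList.length 0 (by omega) (by omega)).1 []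
  simpa [step5] using h
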